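-- pv_equiv track=rewrite | github.com/Erick-INCS/advent_of_code | day14.py | develop
-- ===== SOURCE A (Python) =====
-- def develop(mask):
--     cp = mask.copy()
--     if 'X' in mask:
--         for i in range(len(cp)):
--             if cp[i] == "X":
--                 cp[i] = '0'
--                 zero = develop(cp)
--                 cp[i] = '1'
--                 one = develop(cp)
--
--                 return [*zero, *one]
--     else:
--         return [''.join(cp)]
-- ===== SOURCE B (Python) =====
-- import itertools
--
-- def develop(mask):
--     idxs = [i for i, c in enumerate(mask) if c == 'X']
--     out = []
--     for bits in itertools.product('01', repeat=len(idxs)):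
--         cp = list(mask)
--         for i, b in zip(idxs, bits):
--             cp[i] = b
--         out.append(''.join(cp))
--     return out
-- ===== Notes on version B (the rewrite author's own statement) =====
-- stated objective: idiomatic
-- what changed: Replaced the branching recursion (clone, set first X to 0/1, recurse twice, concatenate) by a single flat loop: collect the X indices once, iterate itertools.product('01', repeat=k), substitute the bits and join.
import Mathlib
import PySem

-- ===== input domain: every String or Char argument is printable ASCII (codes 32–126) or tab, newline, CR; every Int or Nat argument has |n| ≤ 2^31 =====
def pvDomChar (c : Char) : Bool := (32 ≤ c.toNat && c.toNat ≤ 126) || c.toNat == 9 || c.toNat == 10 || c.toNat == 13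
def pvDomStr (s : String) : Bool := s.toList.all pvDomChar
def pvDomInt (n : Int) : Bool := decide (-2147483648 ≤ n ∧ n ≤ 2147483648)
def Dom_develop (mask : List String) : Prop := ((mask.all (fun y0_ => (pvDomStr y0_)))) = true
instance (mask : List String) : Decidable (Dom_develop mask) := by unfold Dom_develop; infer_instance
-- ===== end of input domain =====

-- B replaces A's branching recursion by one flat pass over the 2^k bit tuples (idiomatic); return values only, A copies its argument.

-- ===== PORT A =====
theorem pv_set_first (pre suf : List String) (b : String) :
    (pre ++ "X" :: suf).set pre.length b = pre ++ b :: suf := by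
  rw [show (pre ++ "X" :: suf).set pre.length b = pre ++ ("X" :: suf).set 0 b by simp]
  simp

-- termination helper: setting the first "X" to a non-"X" value strictly lowers the "X"-count
theorem pv_count_set_lt (mask : List String) (i : Nat)
    (h : PySem.List.index? mask "X" = some i) :
    ((mask.set i "0").count "X" < mask.count "X") ∧
    ((mask.set i "1").count "X" < mask.count "X") := by
  rw [PySem.List.index?_eq_some_iff] at h
  obtain ⟨pre, suf, rfl, rfl, -⟩ := h
  constructor <;>
  · rw [pv_set_first]
    simp [List.count_append]

def develop (mask : List String) : List String :=
  -- cp = mask.copy(); if 'X' in mask: scan for the first i with cp[i] == "X", branch on '0'/'1'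
  if _hmem : "X" ∈ mask then
    match _hfi : PySem.List.index? mask "X" with
    | some i =>
        -- the loop's first hit: set to '0', recurse, set to '1', recurse, concatenate
        develop (mask.set i "0") ++ develop (mask.set i "1")
    | none => []  -- unreachable: 'X' ∈ mask guarantees the loop finds an index
  else
    [PySem.Str.join "" mask]
termination_by mask.count "X"
decreasing_by
  · exact (pv_count_set_lt mask i _hfi).1
  · exact (pv_count_set_lt mask i _hfi).2

-- ===== PORT B =====
-- idxs = [i for i, c in enumerate(mask) if c == 'X']
def pvXIdxs (mask : List String) : List Nat :=
  ((PySem.List.enumerate mask).filter (fun p => p.2 == "X")).map (fun p => p.1.toNat)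

-- itertools.product('01', repeat=k), leftmost component varying slowest
def pvBitProduct : Nat → List (List String)
  | 0 => [[]]
  | n + 1 => (["0", "1"].map (fun b => (pvBitProduct n).map (fun bits => b :: bits))).flatten

-- for i, b in zip(idxs, bits): cp[i] = b
def pvAssign (cp : List String) (ps : List (Nat × String)) : List String :=
  ps.foldl (fun c p => c.set p.1 p.2) cp

def develop_alt (mask : List String) : List String :=
  let idxs := pvXIdxs mask
  (pvBitProduct idxs.length).map
    (fun bits => PySem.Str.join "" (pvAssign mask (idxs.zip bits)))

-- ===== PRECONDITION & SPEC =====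
def Spec_develop (mask : List String) (out : List String) : Prop := out = develop_alt mask
instance (mask : List String) (out : List String) : Decidable (Spec_develop mask out) := by unfold Spec_develop; infer_instance

-- ===== CLAIM (what is proved, stated in full; the proofs are below) =====
def Claim_equal_develop : Prop := ∀ (mask : List String), Dom_develop mask → Spec_develop mask (develop mask)

-- ===== LEMMAS AND PROOFS =====

theorem pv_filter_enumerate_nil {mask : List String} (h : "X" ∉ mask) (s : Int) :
    (PySem.List.enumerate mask s).filter (fun p => p.2 == "X") = [] := by
  rw [List.filter_eq_nil_iff]
  intro p hp
  rw [PySem.List.mem_enumerate_iff] at hp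
  obtain ⟨k, hk, rfl⟩ := hp
  simp only [beq_iff_eq]
  intro hx
  exact h (hx ▸ List.getElem_mem hk)

theorem pv_xIdxs_no_mem {mask : List String} (h : "X" ∉ mask) : pvXIdxs mask = [] := by
  simp [pvXIdxs, pv_filter_enumerate_nil h]

-- decomposition of the X-index list at the first "X"
theorem pv_xIdxs_decomp (pre suf : List String) (hpre : "X" ∉ pre) (b : String) (hb : b ≠ "X") :
    pvXIdxs (pre ++ "X" :: suf)
      = pre.length :: pvXIdxs (pre ++ b :: suf) ∧
    (pre ++ b :: suf).set pre.length b = pre ++ b :: suf := by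
  constructor
  · simp only [pvXIdxs, PySem.List.enumerate_append, List.filter_append,
      PySem.List.enumerate_cons, List.map_append]
    rw [pv_filter_enumerate_nil hpre]
    simp [hb, Int.toNat_natCast]
  · rw [show (pre ++ b :: suf).set pre.length b = pre ++ (b :: suf).set 0 b by
      simp]
    simp


-- the alt side splits exactly like A's recursion at the first "X"
theorem pv_alt_step (pre suf : List String) (hpre : "X" ∉ pre) :
    develop_alt (pre ++ "X" :: suf)
      = develop_alt (pre ++ "0" :: suf) ++ develop_alt (pre ++ "1" :: suf) := by
  have h0 := (pv_xIdxs_decomp pre suf hpre "0" (by decide)).1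
  have h1 := (pv_xIdxs_decomp pre suf hpre "1" (by decide)).1
  have hsame : pvXIdxs (pre ++ "0" :: suf) = pvXIdxs (pre ++ "1" :: suf) := by
    injection h0.symm.trans h1
  simp only [develop_alt, h0, ← hsame, List.length_cons,
    pvBitProduct, List.map_cons, List.map_nil, List.flatten_cons, List.flatten_nil,
    List.append_nil, List.map_append, List.map_map]
  congr 1 <;>
  · apply List.map_congr_left
    intro bits _
    simp [Function.comp, pvAssign, List.zip_cons_cons, List.foldl_cons]

theorem pv_develop_eq_alt (mask : List String) : develop mask = develop_alt mask := by
  induction mask using develop.induct with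
  | case1 mask hmem i hfi ih0 ih1 =>
    rw [develop]
    simp only [hmem, dif_pos]
    split
    · next i' hfi' =>
      rw [hfi] at hfi'
      injection hfi' with h
      subst h
      rw [ih0, ih1]
      rw [PySem.List.index?_eq_some_iff] at hfi
      obtain ⟨pre, suf, rfl, rfl, hpre⟩ := hfi
      rw [pv_set_first, pv_set_first, pv_alt_step pre suf hpre]
    · next hfi' =>
      rw [hfi] at hfi'
      exact absurd hfi' (by simp)
  | case2 mask hmem hfi =>
    rw [PySem.List.index?_eq_none_iff] at hfi
    exact absurd hmem hfi
  | case3 mask hmem =>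
    rw [develop]
    simp only [hmem, dif_neg, not_false_iff]
    simp [develop_alt, pv_xIdxs_no_mem hmem, pvBitProduct, pvAssign]

-- ===== VERDICT (by name: the statement is the Claim_ definition above) =====
theorem develop_spec : Claim_equal_develop := by
  intro mask _
  exact pv_develop_eq_alt mask
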